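-- pv_equiv track=rewrite | github.com/Aasthaengg/IBMdataset | Python_codes/p03346/s258893438.py | solve
-- ===== SOURCE A (Python) =====
-- def solve(N, P):
--     Q = [0 for i in range(N)]
--     for i in range(N):
--         Q[P[i]-1] = i
--     max_count = 0
--     count = 0
--     prev = -1
--     for i in range(N):
--         q = Q[i]
--         if prev < q:
--             count += 1
--             prev = q
--         else:
--             max_count = max(max_count, count)
--             count = 1
--             prev = q
--     max_count = max(max_count, count)
--     return N - max_count
-- ===== SOURCE B (Python) =====
-- def solve(N, P):
--     pos = [0] * N
--     for i in range(N):
--         pos[P[i] - 1] = i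
--     bps = [i for i in range(N) if i == 0 or pos[i] <= pos[i - 1]]
--     longest = max((b - a for a, b in zip(bps, bps[1:] + [N])), default=0)
--     return N - longest
-- ===== Notes on version B (the rewrite author's own statement) =====
-- stated objective: alternative
-- what changed: B replaces A's interleaved run-counter state machine (count/prev/max_count) by two separate passes: a comprehension collecting the breakpoint indices where the inverse-position table stops increasing, then N minus the maximum gap between adjacent breakpoints (with N as the final sentinel).
import Mathlib
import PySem

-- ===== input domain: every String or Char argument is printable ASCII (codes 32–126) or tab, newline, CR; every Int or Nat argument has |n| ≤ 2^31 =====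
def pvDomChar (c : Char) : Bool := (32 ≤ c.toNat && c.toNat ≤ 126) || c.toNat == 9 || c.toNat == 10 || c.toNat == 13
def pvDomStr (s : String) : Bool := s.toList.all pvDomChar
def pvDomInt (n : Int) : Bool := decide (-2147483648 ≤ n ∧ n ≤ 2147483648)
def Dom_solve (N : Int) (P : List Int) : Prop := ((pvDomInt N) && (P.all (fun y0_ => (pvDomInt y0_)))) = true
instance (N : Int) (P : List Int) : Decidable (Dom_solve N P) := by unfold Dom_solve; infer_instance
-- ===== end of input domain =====

-- B replaces A's interleaved run-counter state machine by two passes: collect breakpoint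
-- indices of the inverse-position table, then take N minus the maximal gap between
-- adjacent breakpoints. Same O(N) cost; objective: alternative decomposition.

-- ===== PORT A =====
def solve (N : Int) (P : List Int) : Int :=
  -- Q = [0 for i in range(N)]
  let Q0 : List Int := (PySem.List.pyRange 0 N 1).map (fun _ => (0 : Int))
  -- for i in range(N): Q[P[i]-1] = i
  let Q : List Int := (PySem.List.pyRange 0 N 1).foldl
      (fun Q i => PySem.List.pySetD Q (PySem.List.pyGetD P i 0 - 1) i) Q0
  -- max_count = 0; count = 0; prev = -1; for i in range(N): ...
  let s : Int × Int × Int := (PySem.List.pyRange 0 N 1).foldl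
      (fun (st : Int × Int × Int) i =>
        let q := PySem.List.pyGetD Q i 0
        if st.2.2 < q then (st.1, st.2.1 + 1, q)
        else (max st.1 st.2.1, 1, q)) ((0 : Int), (0 : Int), (-1 : Int))
  -- max_count = max(max_count, count); return N - max_count
  N - max s.1 s.2.1

-- ===== PORT B =====
def solve_alt (N : Int) (P : List Int) : Int :=
  -- pos = [0] * N
  let pos0 : List Int := List.replicate N.toNat (0 : Int)
  -- for i in range(N): pos[P[i]-1] = i
  let pos : List Int := (PySem.List.pyRange 0 N 1).foldl
      (fun ps i => PySem.List.pySetD ps (PySem.List.pyGetD P i 0 - 1) i) pos0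
  -- bps = [i for i in range(N) if i == 0 or pos[i] <= pos[i - 1]]
  let bps : List Int := (PySem.List.pyRange 0 N 1).filter
      (fun i => i == 0 || decide (PySem.List.pyGetD pos i 0 ≤ PySem.List.pyGetD pos (i - 1) 0))
  -- longest = max((b - a for a, b in zip(bps, bps[1:] + [N])), default=0)
  let longest : Int := (PySem.List.max?
      ((bps.zip (bps.drop 1 ++ [N])).map (fun p => p.2 - p.1)) (fun y => y)).getD 0
  -- return N - longest
  N - longest

-- ===== PRECONDITION & SPEC =====
-- Pre_ = exactly the inputs on which the Python A returns (no IndexError): for N ≤ 0 both loops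
-- run over an empty range(N), and for N > 0 every index i < N and P[i]-1 must be a valid
-- (possibly negative, wrapping) Python index into a list of length N.
def Pre_solve (N : Int) (P : List Int) : Prop :=
  N ≤ 0 ∨ (N ≤ P.length ∧ ∀ x ∈ P.take N.toNat, 1 - N ≤ x ∧ x ≤ N)
instance (N : Int) (P : List Int) : Decidable (Pre_solve N P) := by unfold Pre_solve; infer_instance

def pvWitness_solve : Int × List Int := (3, [2, 3, 1])

def Spec_solve (N : Int) (P : List Int) (out : Int) : Prop := out = solve_alt N P
instance (N : Int) (P : List Int) (out : Int) : Decidable (Spec_solve N P out) := by unfold Spec_solve; infer_instance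

-- ===== CLAIM (what is proved, stated in full; the proofs are below) =====
def Claim_equal_solve : Prop := ∀ (N : Int) (P : List Int), Dom_solve N P → Pre_solve N P → Spec_solve N P (solve N P)

-- ===== LEMMAS AND PROOFS =====

-- A's loop step on one table entry q.
def stepA (st : Int × Int × Int) (q : Int) : Int × Int × Int :=
  if st.2.2 < q then (st.1, st.2.1 + 1, q) else (max st.1 st.2.1, 1, q)

-- lengths of the maximal strictly increasing runs of `prev :: l`, with `cur` the length
-- already accumulated for the run ending at `prev`
def goRuns (prev cur : Int) : List Int → List Int
  | [] => [cur]
  | q :: r => if prev < q then goRuns q (cur + 1) r else cur :: goRuns q 1 r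

-- breakpoint indices of `prev :: l`, the scan currently at index i
def marksM (prev i : Int) : List Int → List Int
  | [] => []
  | x :: l => if x ≤ prev then i :: marksM x (i + 1) l else marksM x (i + 1) l

def diffsOf (l : List Int) : List Int := (l.zip (l.drop 1)).map (fun p => p.2 - p.1)

theorem lemA (R : List Int) : ∀ (prev cur mc : Int),
    (let s := R.foldl stepA (mc, cur, prev); max s.1 s.2.1) = (goRuns prev cur R).foldl max mc := by
  induction R with
  | nil => intro prev cur mc; simp [goRuns]
  | cons q r ih =>
    intro prev cur mc
    simp only [List.foldl_cons, goRuns, stepA]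
    by_cases h : prev < q
    · simp only [h, if_pos] ; exact ih q (cur + 1) mc
    · simp only [h, if_neg, not_false_iff, List.foldl_cons]
      exact ih q 1 (max mc cur)

theorem filter_marks (pos : List Int) : ∀ (n k : Nat), k + 1 + n = pos.length →
    (PySem.List.pyRange ((k : Int) + 1) (pos.length : Int) 1).filter
      (fun i => i == 0 || decide (PySem.List.pyGetD pos i 0 ≤ PySem.List.pyGetD pos (i - 1) 0))
    = marksM (pos.getD k 0) ((k : Int) + 1) (pos.drop (k + 1)) := by
  intro n
  induction n with
  | zero =>
    intro k hk
    rw [PySem.List.pyRange_one_eq_nil (by omega : (pos.length : Int) ≤ (k : Int) + 1),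
      List.drop_eq_nil_of_le (by omega : pos.length ≤ k + 1)]
    rfl
  | succ n ih =>
    intro k hk
    have hklt : k + 1 < pos.length := by omega
    rw [PySem.List.pyRange_one_cons (by exact_mod_cast by omega : ((k : Int) + 1) < (pos.length : Int))]
    rw [List.filter_cons]
    have hcast : ((k : Int) + 1) = (((k + 1 : Nat)) : Int) := by push_cast; ring
    have hget1 : PySem.List.pyGetD pos ((k : Int) + 1) 0 = pos.getD (k + 1) 0 := by
      rw [hcast, PySem.List.pyGetD_natCast]
    have hget0 : PySem.List.pyGetD pos ((k : Int) + 1 - 1) 0 = pos.getD k 0 := by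
      rw [show (k : Int) + 1 - 1 = (k : Int) by ring, PySem.List.pyGetD_natCast]
    have hdrop : pos.drop (k + 1) = pos.getD (k + 1) 0 :: pos.drop (k + 2) := by
      rw [List.drop_eq_getElem_cons hklt, List.getD_eq_getElem pos 0 hklt]
    have hcond : ((((k : Int) + 1) == 0) ||
        decide (PySem.List.pyGetD pos ((k : Int) + 1) 0 ≤ PySem.List.pyGetD pos ((k : Int) + 1 - 1) 0))
        = decide (pos.getD (k + 1) 0 ≤ pos.getD k 0) := by
      rw [hget1, hget0]
      have : (((k : Int) + 1) == 0) = false := by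
        simp [show (k : Int) + 1 ≠ 0 by omega]
      rw [this, Bool.false_or]
    rw [hcond, hdrop]
    simp only [marksM]
    have ihk := ih (k + 1) (by omega)
    rw [show (((k + 1 : Nat)) : Int) + 1 = (k : Int) + 1 + 1 from by push_cast; ring] at ihk
    by_cases h : pos.getD (k + 1) 0 ≤ pos.getD k 0
    · rw [if_pos (by simpa using h), if_pos h, ihk]
    · rw [if_neg (by simpa using h), if_neg h, ihk]

theorem key (l : List Int) : ∀ (prev a i : Int),
    diffsOf (a :: (marksM prev i l ++ [i + l.length])) = goRuns prev (i - a) l := by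
  induction l with
  | nil => intro prev a i; simp [marksM, diffsOf, goRuns]
  | cons x l ih =>
    intro prev a i
    have hlen : (i : Int) + ((x :: l).length : Int) = (i + 1) + l.length := by simp; ring
    by_cases h : x ≤ prev
    · rw [show marksM prev i (x :: l) = i :: marksM x (i + 1) l from by simp [marksM, h],
         show goRuns prev (i - a) (x :: l) = (i - a) :: goRuns x 1 l from by
           simp [goRuns, not_lt.mpr h], hlen, List.cons_append]
      have step : diffsOf (a :: i :: (marksM x (i + 1) l ++ [(i + 1) + (l.length : Int)])) =
          (i - a) :: diffsOf (i :: (marksM x (i + 1) l ++ [(i + 1) + (l.length : Int)])) := by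
        simp [diffsOf]
      rw [step, ih x i (i + 1), show (i : Int) + 1 - i = 1 by ring]
    · rw [show marksM prev i (x :: l) = marksM x (i + 1) l from by simp [marksM, h],
         show goRuns prev (i - a) (x :: l) = goRuns x ((i - a) + 1) l from by
           simp [goRuns, not_le.mp h], hlen, ih x a (i + 1),
         show (i : Int) + 1 - a = (i - a) + 1 by ring]

theorem goRuns_head (R : List Int) : ∀ (prev cur : Int),
    ∃ d t, goRuns prev cur R = d :: t ∧ cur ≤ d := by
  induction R with
  | nil => intro prev cur; exact ⟨cur, [], rfl, le_refl _⟩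
  | cons q r ih =>
    intro prev cur
    by_cases h : prev < q
    · obtain ⟨d, t, he, hd⟩ := ih q (cur + 1)
      exact ⟨d, t, by simp [goRuns, h, he], by omega⟩
    · exact ⟨cur, goRuns q 1 r, by simp [goRuns, h], le_refl _⟩

theorem replicate_eq_map_pyRange (N : Int) :
    ((PySem.List.pyRange 0 N 1).map (fun _ => (0 : Int))) = List.replicate N.toNat (0 : Int) := by
  rw [PySem.List.pyRange_one, List.map_map]
  rw [List.eq_replicate_iff]
  simp

theorem length_buildFold (l : List Int) : ∀ (P : List Int) (init : List Int),
    (l.foldl (fun Q i => PySem.List.pySetD Q (PySem.List.pyGetD P i 0 - 1) i) init).length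
      = init.length := by
  induction l with
  | nil => intro P init; rfl
  | cons x l ih =>
    intro P init
    simp only [List.foldl_cons, ih, PySem.List.length_pySetD]

-- ===== VERDICT (by name: the statement is the Claim_ definition above) =====
theorem solve_spec : Claim_equal_solve := by
  intro N P _ _
  simp only [Spec_solve, solve, solve_alt]
  rw [replicate_eq_map_pyRange]
  set pos := (PySem.List.pyRange 0 N 1).foldl
      (fun Q i => PySem.List.pySetD Q (PySem.List.pyGetD P i 0 - 1) i)
      (List.replicate N.toNat (0 : Int)) with hpos
  have hlen : pos.length = N.toNat := by
    rw [hpos, length_buildFold, List.length_replicate]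
  clear hpos
  clear_value pos
  by_cases hN : N ≤ 0
  · -- range(N) is empty: A returns N - max(0,0), B returns N - 0
    rw [PySem.List.pyRange_one_eq_nil (by omega : N ≤ (0 : Int))]
    simp [PySem.List.max?]
  · -- N > 0
    replace hN : 0 < N := by omega
    have hlenI : (pos.length : Int) = N := by rw [hlen, Int.toNat_of_nonneg (by omega)]
    -- A's second loop is a fold over pos itself
    have hfun : (fun (st : Int × Int × Int) (i : Int) =>
        if st.2.2 < PySem.List.pyGetD pos i 0 then (st.1, st.2.1 + 1, PySem.List.pyGetD pos i 0)
        else (max st.1 st.2.1, 1, PySem.List.pyGetD pos i 0))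
        = fun st i => stepA st (PySem.List.pyGetD pos i 0) := rfl
    have hA := PySem.List.foldl_pyRange_zero_pyGetD' pos 0 stepA ((0 : Int), (0 : Int), (-1 : Int))
    rw [hlenI] at hA
    rw [hfun, hA]
    -- B's comprehension is 0 followed by the breakpoint marks
    obtain ⟨q, r, rfl⟩ : ∃ q r, pos = q :: r := by
      cases pos with
      | nil => simp at hlen; omega
      | cons a l => exact ⟨a, l, rfl⟩
    have hNr : N = 1 + (r.length : Int) := by rw [← hlenI]; simp; ring
    have hmarks := filter_marks (q :: r) r.length 0 (by simp; omega)
    rw [hlenI] at hmarks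
    simp only [Nat.cast_zero, zero_add, List.getD_cons_zero, List.drop_succ_cons,
      List.drop_zero] at hmarks
    rw [PySem.List.pyRange_one_cons (by omega : (0 : Int) < N), List.filter_cons,
      if_pos (by simp), show (0 : Int) + 1 = 1 from by ring, hmarks]
    set M := marksM q 1 r with hM
    -- the zipped difference list is diffsOf (0 :: (M ++ [N]))
    have hzip : (((0 : Int) :: M).zip (List.drop 1 ((0 : Int) :: M) ++ [N]))
        = (((0 : Int) :: (M ++ [N])).zip (List.drop 1 ((0 : Int) :: (M ++ [N])))) := by
      simp only [List.drop_succ_cons, List.drop_zero]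
      have h1 : ((0 : Int) :: (M ++ [N])) = ((0 : Int) :: M) ++ [N] := by simp
      have h2 : (M ++ [N]) = (M ++ [N]) ++ ([] : List Int) := by simp
      rw [h1]
      conv_rhs => rw [h2]
      rw [List.zip_append (by simp)]
      simp
    rw [hzip]
    have hdiff : ((((0 : Int) :: (M ++ [N])).zip (List.drop 1 ((0 : Int) :: (M ++ [N])))).map
        (fun p => p.2 - p.1)) = goRuns q 1 r := by
      have hk := key r q 0 1
      rw [show (1 : Int) - 0 = 1 from by ring] at hk
      rw [hM, hNr]
      exact hk
    rw [hdiff]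
    obtain ⟨d, t, he, hd⟩ := goRuns_head r q 1
    have hAval : max (((q :: r).foldl stepA ((0 : Int), (0 : Int), (-1 : Int))).1)
        (((q :: r).foldl stepA ((0 : Int), (0 : Int), (-1 : Int))).2.1)
        = (goRuns (-1) 0 (q :: r)).foldl max 0 := lemA (q :: r) (-1) 0 0
    have hfold : (goRuns (-1) 0 (q :: r)).foldl max 0 = (goRuns q 1 r).foldl max 0 := by
      by_cases h : (-1 : Int) < q
      · simp [goRuns, h]
      · simp [goRuns, h]
    rw [hAval, hfold, he, PySem.List.max?_id_cons]
    simp only [List.foldl_cons, Option.getD_some]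
    rw [max_eq_right (show (0 : Int) ≤ d by omega)]
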